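-- pv_equiv track=rewrite | github.com/idokatz86/Archmorph | backend/iac_scaffold.py | _group_services
-- ===== SOURCE A (Python) =====
-- from typing import Dict, List, Optional
--
-- _CATEGORY_MAP: Dict[str, str] = {
--     # Compute
--     "virtual machine": "compute",
--     "vm": "compute",
--     "vmss": "compute",
--     "container app": "compute",
--     "container apps": "compute",
--     "app service": "compute",
--     "function app": "compute",
--     "functions": "compute",
--     "aks": "compute",
--     "kubernetes": "compute",
--     "batch": "compute",
--     "container instances": "compute",
--     "aci": "compute",
--     "spring apps": "compute",
--     "web app": "compute",
--     # Database
--     "sql": "database",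
--     "azure sql": "database",
--     "postgresql": "database",
--     "cosmos db": "database",
--     "cosmosdb": "database",
--     "mysql": "database",
--     "mariadb": "database",
--     "redis": "database",
--     "cache for redis": "database",
--     "sql server": "database",
--     "sql database": "database",
--     # Storage
--     "storage account": "storage",
--     "blob storage": "storage",
--     "blob": "storage",
--     "file share": "storage",
--     "data lake": "storage",
--     "queue storage": "storage",
--     "table storage": "storage",
--     "cdn": "storage",
--     # Networking
--     "virtual network": "networking",
--     "vnet": "networking",
--     "load balancer": "networking",
--     "application gateway": "networking",
--     "front door": "networking",
--     "dns zone": "networking",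
--     "private endpoint": "networking",
--     "nat gateway": "networking",
--     "vpn gateway": "networking",
--     "expressroute": "networking",
--     "firewall": "networking",
--     "bastion": "networking",
--     "traffic manager": "networking",
--     "nsg": "networking",
--     "network security group": "networking",
--     # Security
--     "key vault": "security",
--     "managed identity": "security",
--     "service principal": "security",
--     "rbac": "security",
--     "azure ad": "security",
--     "entra id": "security",
--     "defender": "security",
--     "sentinel": "security",
--     "monitor": "security",
--     "log analytics": "security",
--     "application insights": "security",
-- }
--
-- def _categorize_service(service_name: str, category_hint: str = "") -> str:
--     """Classify a service into a module category."""
--     hint = category_hint.lower().strip()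
--     if hint in ("compute", "database", "storage", "networking", "security"):
--         return hint
--
--     name = service_name.lower()
--     for keyword, cat in _CATEGORY_MAP.items():
--         if keyword in name:
--             return cat
--
--     return "compute"  # default bucket
--
-- def _group_services(mappings: List[dict]) -> Dict[str, List[dict]]:
--     """Group analysis mappings by module category."""
--     groups: Dict[str, List[dict]] = {
--         "networking": [],
--         "compute": [],
--         "database": [],
--         "storage": [],
--         "security": [],
--     }
--     for m in mappings:
--         azure_svc = m.get("azure_service", m.get("target_service", "unknown"))
--         cat = _categorize_service(azure_svc, m.get("category", ""))
--         groups[cat].append(m)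
--     return groups
-- ===== SOURCE B (Python) =====
-- from typing import Dict, List
--
-- # Keyword table regrouped per category, in the same overall scan order as the
-- # original flat dict (it was grouped compute, database, storage, networking,
-- # security in insertion order), so the first-match category is identical.
-- _CATEGORY_KEYWORDS = [
--     ("compute", ["virtual machine", "vm", "vmss", "container app",
--                  "container apps", "app service", "function app", "functions",
--                  "aks", "kubernetes", "batch", "container instances", "aci",
--                  "spring apps", "web app"]),
--     ("database", ["sql", "azure sql", "postgresql", "cosmos db", "cosmosdb",
--                   "mysql", "mariadb", "redis", "cache for redis", "sql server",
--                   "sql database"]),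
--     ("storage", ["storage account", "blob storage", "blob", "file share",
--                  "data lake", "queue storage", "table storage", "cdn"]),
--     ("networking", ["virtual network", "vnet", "load balancer",
--                     "application gateway", "front door", "dns zone",
--                     "private endpoint", "nat gateway", "vpn gateway",
--                     "expressroute", "firewall", "bastion", "traffic manager",
--                     "nsg", "network security group"]),
--     ("security", ["key vault", "managed identity", "service principal", "rbac",
--                   "azure ad", "entra id", "defender", "sentinel", "monitor",
--                   "log analytics", "application insights"]),
-- ]
--
-- def _categorize_service(service_name: str, category_hint: str = "") -> str:
--     hint = category_hint.lower().strip()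
--     if hint in ("compute", "database", "storage", "networking", "security"):
--         return hint
--     name = service_name.lower()
--     for cat, keywords in _CATEGORY_KEYWORDS:
--         if any(kw in name for kw in keywords):
--             return cat
--     return "compute"
--
-- def _classify(m: dict) -> str:
--     return _categorize_service(
--         m.get("azure_service", m.get("target_service", "unknown")),
--         m.get("category", ""),
--     )
--
-- def _group_services(mappings: List[dict]) -> Dict[str, List[dict]]:
--     """Group analysis mappings by module category (per-category filter)."""
--     return {
--         cat: [m for m in mappings if _classify(m) == cat]
--         for cat in ("networking", "compute", "database", "storage", "security")
--     }
-- ===== Notes on version B (the rewrite author's own statement) =====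
-- stated objective: simpler
-- what changed: Replaces the single dispatch loop appending into a pre-built mutable dict of buckets with a dict comprehension that filters the mappings per fixed category, and replaces the flat 60-entry keyword->category dict scan with a per-category keyword-list table scanned with any(), which is order-equivalent because the original dict was grouped by category.
import Mathlib
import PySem

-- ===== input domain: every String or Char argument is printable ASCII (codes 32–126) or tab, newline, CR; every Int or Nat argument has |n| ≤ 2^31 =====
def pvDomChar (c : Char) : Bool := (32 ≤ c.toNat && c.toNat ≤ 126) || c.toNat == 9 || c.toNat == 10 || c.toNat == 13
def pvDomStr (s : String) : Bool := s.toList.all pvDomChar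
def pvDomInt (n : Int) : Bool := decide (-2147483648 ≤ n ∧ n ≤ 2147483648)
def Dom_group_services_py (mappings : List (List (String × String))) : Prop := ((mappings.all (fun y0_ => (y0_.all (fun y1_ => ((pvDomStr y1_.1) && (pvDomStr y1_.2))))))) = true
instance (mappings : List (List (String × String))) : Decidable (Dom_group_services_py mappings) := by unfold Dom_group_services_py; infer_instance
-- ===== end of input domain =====

-- B replaces A's single dispatch loop (append into a mutable dict of buckets) by a per-category
-- filter comprehension, and A's flat keyword->category dict scan by a per-category keyword-list
-- table scanned with any(); same classification order, same result, simpler code.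

-- ===== PORT A =====
-- module constant _CATEGORY_MAP (a dict literal with 60 distinct keys, insertion order)
def pvCategoryMap : List (String × String) := [
  ("virtual machine", "compute"),
  ("vm", "compute"),
  ("vmss", "compute"),
  ("container app", "compute"),
  ("container apps", "compute"),
  ("app service", "compute"),
  ("function app", "compute"),
  ("functions", "compute"),
  ("aks", "compute"),
  ("kubernetes", "compute"),
  ("batch", "compute"),
  ("container instances", "compute"),
  ("aci", "compute"),
  ("spring apps", "compute"),
  ("web app", "compute"),
  ("sql", "database"),
  ("azure sql", "database"),
  ("postgresql", "database"),
  ("cosmos db", "database"),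
  ("cosmosdb", "database"),
  ("mysql", "database"),
  ("mariadb", "database"),
  ("redis", "database"),
  ("cache for redis", "database"),
  ("sql server", "database"),
  ("sql database", "database"),
  ("storage account", "storage"),
  ("blob storage", "storage"),
  ("blob", "storage"),
  ("file share", "storage"),
  ("data lake", "storage"),
  ("queue storage", "storage"),
  ("table storage", "storage"),
  ("cdn", "storage"),
  ("virtual network", "networking"),
  ("vnet", "networking"),
  ("load balancer", "networking"),
  ("application gateway", "networking"),
  ("front door", "networking"),
  ("dns zone", "networking"),
  ("private endpoint", "networking"),
  ("nat gateway", "networking"),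
  ("vpn gateway", "networking"),
  ("expressroute", "networking"),
  ("firewall", "networking"),
  ("bastion", "networking"),
  ("traffic manager", "networking"),
  ("nsg", "networking"),
  ("network security group", "networking"),
  ("key vault", "security"),
  ("managed identity", "security"),
  ("service principal", "security"),
  ("rbac", "security"),
  ("azure ad", "security"),
  ("entra id", "security"),
  ("defender", "security"),
  ("sentinel", "security"),
  ("monitor", "security"),
  ("log analytics", "security"),
  ("application insights", "security")]

-- the 'for keyword, cat in _CATEGORY_MAP.items(): if keyword in name: return cat' loop of A's _categorize_service
def pvCatLoop (name : String) : List (String × String) → String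
  | [] => "compute"
  | (kw, cat) :: rest => if PySem.Str.isIn kw name then cat else pvCatLoop name rest

-- A's module helper _categorize_service
def categorize_service (service_name : String) (category_hint : String) : String :=
  let hint := PySem.Str.strip (PySem.Str.lower category_hint)
  if hint = "compute" ∨ hint = "database" ∨ hint = "storage" ∨ hint = "networking" ∨ hint = "security" then hint
  else pvCatLoop (PySem.Str.lower service_name) pvCategoryMap

-- groups[cat].append(m): cat is always a key of groups (see catLoop_mem below), so Python never
-- raises KeyError here and Dict.modify with default [] is exact.
def group_services_py (mappings : List (List (String × String))) : List (String × List (List (String × String))) :=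
  let groups : PySem.Dict String (List (List (String × String))) :=
    PySem.Dict.ofList [("networking", []), ("compute", []), ("database", []), ("storage", []), ("security", [])]
  (mappings.foldl (fun g m =>
    let azure_svc := (PySem.Dict.mk m).getD "azure_service" ((PySem.Dict.mk m).getD "target_service" "unknown")
    let cat := categorize_service azure_svc ((PySem.Dict.mk m).getD "category" "")
    g.modify cat [] (· ++ [m])) groups).items

-- ===== PORT B =====
-- B's module constant _CATEGORY_KEYWORDS: per-category keyword lists, same overall scan order
def pvCategoryKeywords : List (String × List String) := [
  ("compute", ["virtual machine", "vm", "vmss", "container app",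
               "container apps", "app service", "function app", "functions",
               "aks", "kubernetes", "batch", "container instances", "aci",
               "spring apps", "web app"]),
  ("database", ["sql", "azure sql", "postgresql", "cosmos db", "cosmosdb",
                "mysql", "mariadb", "redis", "cache for redis", "sql server",
                "sql database"]),
  ("storage", ["storage account", "blob storage", "blob", "file share",
               "data lake", "queue storage", "table storage", "cdn"]),
  ("networking", ["virtual network", "vnet", "load balancer",
                  "application gateway", "front door", "dns zone",
                  "private endpoint", "nat gateway", "vpn gateway",
                  "expressroute", "firewall", "bastion", "traffic manager",
                  "nsg", "network security group"]),
  ("security", ["key vault", "managed identity", "service principal", "rbac",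
                "azure ad", "entra id", "defender", "sentinel", "monitor",
                "log analytics", "application insights"])]

-- B's _categorize_service: the 'for cat, keywords in _CATEGORY_KEYWORDS: if any(kw in name ...)'
-- loop is transcribed as find? over the group list (first group with a matching keyword)
def categorize_service_b (service_name : String) (category_hint : String) : String :=
  let hint := PySem.Str.strip (PySem.Str.lower category_hint)
  if hint = "compute" ∨ hint = "database" ∨ hint = "storage" ∨ hint = "networking" ∨ hint = "security" then hint
  else
    let name := PySem.Str.lower service_name
    match pvCategoryKeywords.find? (fun p => p.2.any (fun kw => PySem.Str.isIn kw name)) with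
    | some p => p.1
    | none => "compute"

-- helper _classify of Source B
def pvClassifyB (m : List (String × String)) : String :=
  categorize_service_b
    ((PySem.Dict.mk m).getD "azure_service" ((PySem.Dict.mk m).getD "target_service" "unknown"))
    ((PySem.Dict.mk m).getD "category" "")

def group_services_py_alt (mappings : List (List (String × String))) : List (String × List (List (String × String))) :=
  ["networking", "compute", "database", "storage", "security"].map
    (fun cat => (cat, mappings.filter (fun m => pvClassifyB m == cat)))

-- ===== PRECONDITION & SPEC =====
def Spec_group_services_py (mappings : List (List (String × String))) (out : List (String × List (List (String × String)))) : Prop := out = group_services_py_alt mappings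
instance (mappings : List (List (String × String))) (out : List (String × List (List (String × String)))) : Decidable (Spec_group_services_py mappings out) := by unfold Spec_group_services_py; infer_instance

-- ===== CLAIM (what is proved, stated in full; the proofs are below) =====
def Claim_equal_group_services_py : Prop := ∀ (mappings : List (List (String × String))), Dom_group_services_py mappings → Spec_group_services_py mappings (group_services_py mappings)

-- ===== LEMMAS AND PROOFS =====

def pvCats : List String := ["networking", "compute", "database", "storage", "security"]

-- A's classify, abbreviated (used only in the proofs)
def pvClassify (m : List (String × String)) : String :=
  categorize_service
    ((PySem.Dict.mk m).getD "azure_service" ((PySem.Dict.mk m).getD "target_service" "unknown"))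
    ((PySem.Dict.mk m).getD "category" "")

lemma catLoop_mem (name : String) (l : List (String × String)) (h : ∀ p ∈ l, p.2 ∈ pvCats) :
    pvCatLoop name l ∈ pvCats := by
  induction l with
  | nil => simp [pvCatLoop, pvCats]
  | cons p rest ih =>
    obtain ⟨kw, cat⟩ := p
    simp only [pvCatLoop]
    split
    · exact h (kw, cat) (by simp)
    · exact ih (fun q hq => h q (by simp [hq]))

lemma catMap_vals : ∀ p ∈ pvCategoryMap, p.2 ∈ pvCats := by decide

lemma categorize_mem (sn ch : String) : categorize_service sn ch ∈ pvCats := by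
  simp only [categorize_service]
  split
  · rename_i h
    rcases h with h | h | h | h | h <;> rw [h] <;> decide
  · exact catLoop_mem _ _ catMap_vals

lemma classify_mem (m : List (String × String)) : pvClassify m ∈ pvCats :=
  categorize_mem _ _

-- scanning one keyword group (all mapped to cat c) is the same as an any-test for the group
lemma loop_group (name c : String) (kws : List String) (rest : List (String × String)) :
    pvCatLoop name (kws.map (fun kw => (kw, c)) ++ rest)
      = if kws.any (fun kw => PySem.Str.isIn kw name) then c else pvCatLoop name rest := by
  induction kws with
  | nil => simp
  | cons k ks ih =>
    simp only [List.map, List.cons_append, pvCatLoop]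
    by_cases hk : PySem.Str.isIn k name = true
    · rw [if_pos hk, if_pos (by rw [List.any_cons, hk, Bool.true_or])]
    · rw [if_neg hk, ih, List.any_cons, Bool.eq_false_iff.mpr hk, Bool.false_or]

-- the flat first-match scan over a grouped map equals find? over the groups
lemma loop_grouped (name : String) (gs : List (String × List String)) :
    pvCatLoop name (gs.flatMap (fun p => p.2.map (fun kw => (kw, p.1))))
      = (((gs.find? (fun p => p.2.any (fun kw => PySem.Str.isIn kw name))).map (·.1)).getD "compute") := by
  induction gs with
  | nil => simp [pvCatLoop]
  | cons g rest ih =>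
    obtain ⟨c, kws⟩ := g
    rw [List.flatMap_cons, loop_group]
    by_cases hk : (kws.any fun kw => PySem.Str.isIn kw name) = true
    · rw [if_pos hk]
      have : List.find? (fun p => p.2.any fun kw => PySem.Str.isIn kw name) ((c, kws) :: rest)
          = some (c, kws) := by rw [List.find?_cons, hk]
      rw [this]
      rfl
    · rw [if_neg hk, ih]
      have : List.find? (fun p => p.2.any fun kw => PySem.Str.isIn kw name) ((c, kws) :: rest)
          = List.find? (fun p => p.2.any fun kw => PySem.Str.isIn kw name) rest := by
        rw [List.find?_cons, Bool.eq_false_iff.mpr hk]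
      rw [this]

lemma catMap_grouped :
    pvCategoryMap = pvCategoryKeywords.flatMap (fun p => p.2.map (fun kw => (kw, p.1))) := by
  decide

lemma categorize_eq (sn ch : String) : categorize_service sn ch = categorize_service_b sn ch := by
  simp only [categorize_service, categorize_service_b]
  split
  · rfl
  · rw [catMap_grouped, loop_grouped]
    cases pvCategoryKeywords.find? (fun p => p.2.any (fun kw => PySem.Str.isIn kw (PySem.Str.lower sn))) <;> rfl

lemma classify_eq : pvClassify = pvClassifyB := by
  funext m
  exact categorize_eq _ _

lemma foldl_eq_foldl_pairs (mappings : List (List (String × String)))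
    (g : PySem.Dict String (List (List (String × String)))) :
    mappings.foldl (fun g m => g.modify (pvClassify m) [] (· ++ [m])) g
      = (mappings.map (fun m => (pvClassify m, m))).foldl (fun g p => g.modify p.1 [] (· ++ [p.2])) g := by
  induction mappings generalizing g with
  | nil => rfl
  | cons m rest ih => simp only [List.map, List.foldl]; exact ih _

lemma getD_g0_of_mem (c : String) (hc : c ∈ pvCats) :
    (PySem.Dict.ofList ([("networking", []), ("compute", []), ("database", []), ("storage", []), ("security", [])] : List (String × List (List (String × String))))).getD c [] = [] := by
  fin_cases hc <;> rfl

theorem group_services_py_spec : Claim_equal_group_services_py := by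
  intro mappings _
  unfold Spec_group_services_py group_services_py group_services_py_alt
  have hfold : (fun (g : PySem.Dict String (List (List (String × String)))) (m : List (String × String)) =>
      let azure_svc := (PySem.Dict.mk m).getD "azure_service" ((PySem.Dict.mk m).getD "target_service" "unknown")
      let cat := categorize_service azure_svc ((PySem.Dict.mk m).getD "category" "")
      g.modify cat [] (· ++ [m]))
      = (fun (g : PySem.Dict String (List (List (String × String)))) m => g.modify (pvClassify m) [] (· ++ [m])) := rfl
  set g0 : PySem.Dict String (List (List (String × String))) :=
    PySem.Dict.ofList [("networking", []), ("compute", []), ("database", []), ("storage", []), ("security", [])] with hg0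
  rw [hfold]
  show (List.foldl (fun g m => g.modify (pvClassify m) [] (· ++ [m])) g0 mappings).items
      = ["networking", "compute", "database", "storage", "security"].map
          (fun cat => (cat, mappings.filter (fun m => pvClassifyB m == cat)))
  rw [foldl_eq_foldl_pairs]
  set F := (mappings.map (fun m => (pvClassify m, m))).foldl (fun g p => g.modify p.1 [] (· ++ [p.2])) g0 with hF
  have hk0 : g0.keys = pvCats := by decide
  have hkeys : F.keys = pvCats := by
    rw [hF, PySem.Dict.keys_foldl_modify_key, hk0, List.map_map]
    have h1 : (mappings.map ((·.1) ∘ fun m => (pvClassify m, m))) = mappings.map pvClassify := by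
      simp
    rw [h1, PySem.Set.update_eq_append_filter]
    have h2 : ((PySem.Set.ofList (mappings.map pvClassify)).filter
        (fun y => !(PySem.Set.contains pvCats y))) = [] := by
      apply List.filter_eq_nil_iff.mpr
      intro y hy
      have hy' : y ∈ mappings.map pvClassify := by simpa [pysem] using hy
      obtain ⟨m, _, rfl⟩ := List.mem_map.mp hy'
      simp [pysem, classify_mem m]
    rw [h2, List.append_nil]
  have hnd : F.keys.Nodup := by rw [hkeys]; decide
  rw [PySem.Dict.items_eq_map_keys F hnd [], hkeys]
  apply List.map_congr_left
  intro c hc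
  have hgd : F.getD c [] = mappings.filter (fun m => pvClassify m == c) := by
    rw [hF, PySem.Dict.getD_foldl_modify_append, hg0, getD_g0_of_mem c hc, List.nil_append]
    simp [List.filter_map, Function.comp_def]
  rw [hgd, classify_eq]
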